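-- pv_equiv track=rewrite | github.com/underfitting-lu/contractskill | run_vwa_experiment.py | extract_classifieds_pagination_targets
-- ===== SOURCE A (Python) =====
-- from typing import Any
--
-- def extract_classifieds_pagination_targets(current_skill: dict[str, Any]) -> list[str]:
--     targets: list[str] = []
--     seen: set[str] = set()
--     for entry in current_skill.get("repair_history") or []:
--         if not isinstance(entry, str) or not entry.startswith("classf_pages:"):
--             continue
--         payload = entry[len("classf_pages:") :]
--         for item in payload.split(" || "):
--             target = item.strip()
--             if not target or target in seen:
--                 continue
--             seen.add(target)
--             targets.append(target)
--     return targets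
-- ===== SOURCE B (Python) =====
-- def _dedup(cands):
--     """Order-preserving dedup by head-and-filter recursion: keep the first
--     element, delete all its later copies, recurse on what is left."""
--     if not cands:
--         return []
--     head = cands[0]
--     return [head] + _dedup([x for x in cands[1:] if x != head])
--
-- def extract_classifieds_pagination_targets(current_skill):
--     # Phase 1: flatten to the ordered candidate list (duplicates kept).
--     cands = [t
--              for entry in (current_skill.get("repair_history") or [])
--              if isinstance(entry, str) and entry.startswith("classf_pages:")
--              for t in map(str.strip, entry[len("classf_pages:"):].split(" || "))
--              if t]
--     # Phase 2: head-and-filter recursive dedup.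
--     return _dedup(cands)
-- ===== Notes on version B (the rewrite author's own statement) =====
-- stated objective: alternative
-- what changed: B first flattens all entries into one ordered candidate list, then deduplicates it by a head-and-filter recursion (keep the head, remove its later copies from the tail, recurse) instead of A's single pass with an inline seen-set.
import Mathlib
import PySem

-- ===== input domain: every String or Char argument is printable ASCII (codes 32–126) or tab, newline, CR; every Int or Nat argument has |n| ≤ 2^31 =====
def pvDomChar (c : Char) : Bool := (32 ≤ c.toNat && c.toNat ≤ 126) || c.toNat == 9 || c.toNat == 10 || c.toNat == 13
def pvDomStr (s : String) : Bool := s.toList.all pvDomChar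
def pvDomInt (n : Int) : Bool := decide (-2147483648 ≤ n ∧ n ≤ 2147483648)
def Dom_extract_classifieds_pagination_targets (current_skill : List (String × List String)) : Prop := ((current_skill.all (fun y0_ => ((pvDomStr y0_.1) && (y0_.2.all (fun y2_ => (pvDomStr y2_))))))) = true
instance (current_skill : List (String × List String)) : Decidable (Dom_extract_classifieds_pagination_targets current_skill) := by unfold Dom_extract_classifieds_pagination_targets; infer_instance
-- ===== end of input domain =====

-- B flattens everything into one candidate list, then deduplicates by head-and-filter
-- recursion (keep head, delete its copies from the tail, recurse) instead of A's inline seen-set pass.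


-- ===== PORT A =====
-- current_skill.get("repair_history") or []  (an empty list is falsy, so `or []` still yields [])
def pvHistory (current_skill : List (String × List String)) : List String :=
  match PySem.Dict.get? ⟨current_skill⟩ "repair_history" with
  | none => []
  | some h => if h = [] then [] else h

-- inner loop: for item in payload.split(" || "): …   (" || " ≠ "", so split? is always some)
def pvInnerA (st : List String × PySem.Set String) (payload : String) :
    List String × PySem.Set String :=
  ((PySem.Str.split? payload " || ").getD []).foldl
    (fun st item =>
      let target := PySem.Str.strip item
      if target == "" || PySem.Set.contains st.2 target then st
      else (st.1 ++ [target], PySem.Set.add st.2 target))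
    st

def extract_classifieds_pagination_targets (current_skill : List (String × List String)) : List String :=
  ((pvHistory current_skill).foldl
    (fun (st : List String × PySem.Set String) entry =>
      if !(PySem.Str.startswith entry "classf_pages:") then st
      else pvInnerA st (PySem.Str.slice entry (some 13) none))
    ([], PySem.Set.empty)).1

-- ===== PORT B =====
-- flatten phase: all stripped non-empty split items of each prefixed entry, duplicates kept
def pvCandidates (entry : String) : List String :=
  if PySem.Str.startswith entry "classf_pages:" then
    (((PySem.Str.split? (PySem.Str.slice entry (some 13) none) " || ").getD []).map
        PySem.Str.strip).filter (fun t => !(t == ""))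
  else []

-- dedup phase: head-and-filter recursion (terminates: the filtered tail is shorter)
def pvDedupRec : List String → List String
  | [] => []
  | x :: xs => x :: pvDedupRec (xs.filter (fun y => !(y == x)))
termination_by l => l.length
decreasing_by
  simp only [List.length_unattach]
  exact Nat.lt_succ_of_le (le_trans (List.length_filter_le _ _) (by simp))

def extract_classifieds_pagination_targets_alt (current_skill : List (String × List String)) : List String :=
  pvDedupRec ((pvHistory current_skill).flatMap pvCandidates)

-- ===== PRECONDITION & SPEC =====
def Spec_extract_classifieds_pagination_targets (current_skill : List (String × List String)) (out : List String) : Prop := out = extract_classifieds_pagination_targets_alt current_skill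
instance (current_skill : List (String × List String)) (out : List String) : Decidable (Spec_extract_classifieds_pagination_targets current_skill out) := by unfold Spec_extract_classifieds_pagination_targets; infer_instance

-- ===== CLAIM (what is proved, stated in full; the proofs are below) =====
def Claim_equal_extract_classifieds_pagination_targets : Prop := ∀ (current_skill : List (String × List String)), Dom_extract_classifieds_pagination_targets current_skill → Spec_extract_classifieds_pagination_targets current_skill (extract_classifieds_pagination_targets current_skill)

-- ===== LEMMAS AND PROOFS =====

-- the dedup step of A: skip a seen element, otherwise push it to both components
def pvStep (st : List String × PySem.Set String) (x : String) : List String × PySem.Set String :=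
  if PySem.Set.contains st.2 x then st else (st.1 ++ [x], PySem.Set.add st.2 x)

-- A's inner loop is pvStep folded over the entry's candidate list
theorem pvInnerA_eq_foldl_step (payload : String) (st : List String × PySem.Set String) :
    pvInnerA st payload =
      ((((PySem.Str.split? payload " || ").getD []).map PySem.Str.strip).filter
          (fun t => !(t == ""))).foldl pvStep st := by
  unfold pvInnerA
  generalize (PySem.Str.split? payload " || ").getD [] = items
  induction items generalizing st with
  | nil => rfl
  | cons i rest ih =>
    simp only [List.foldl_cons, List.map_cons, List.filter_cons]
    by_cases h0 : (PySem.Str.strip i == "") = true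
    · simp only [h0, Bool.true_or, if_true, Bool.not_true, Bool.false_eq_true, if_false]
      exact ih st
    · simp only [Bool.not_eq_true] at h0
      simp only [h0, Bool.false_or, Bool.not_false, if_true, List.foldl_cons]
      show List.foldl _ (pvStep st (PySem.Str.strip i)) rest = _
      exact ih _

-- A's whole loop is pvStep folded over the flattened candidate list
theorem pvA_eq_foldl_step (hist : List String) (st : List String × PySem.Set String) :
    hist.foldl
      (fun (st : List String × PySem.Set String) entry =>
        if !(PySem.Str.startswith entry "classf_pages:") then st
        else pvInnerA st (PySem.Str.slice entry (some 13) none)) st =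
    (hist.flatMap pvCandidates).foldl pvStep st := by
  induction hist generalizing st with
  | nil => rfl
  | cons e rest ih =>
    have hstep : (if !(PySem.Str.startswith e "classf_pages:") then st
        else pvInnerA st (PySem.Str.slice e (some 13) none)) =
        List.foldl pvStep st (pvCandidates e) := by
      unfold pvCandidates
      cases h : PySem.Str.startswith e "classf_pages:"
      · simp
      · simp only [Bool.not_true, Bool.false_eq_true, if_false, if_true]
        rw [pvInnerA_eq_foldl_step]
    rw [List.foldl_cons, hstep, ih, List.flatMap_cons, List.foldl_append]

-- when both components coincide, pvStep is Set.add on both components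
theorem pvStep_foldl_diag (xs : List String) (s : PySem.Set String) :
    xs.foldl pvStep (s, s) = (xs.foldl PySem.Set.add s, xs.foldl PySem.Set.add s) := by
  induction xs generalizing s with
  | nil => rfl
  | cons x rest ih =>
    by_cases h : x ∈ s
    · have h1 : pvStep (s, s) x = (s, s) := by simp [pvStep, h]
      have h2 : PySem.Set.add s x = s := by simp [PySem.Set.add, h]
      rw [List.foldl_cons, List.foldl_cons, h1, h2]
      exact ih s
    · have h1 : pvStep (s, s) x = (s ++ [x], s ++ [x]) := by simp [pvStep, PySem.Set.add, h]
      have h2 : PySem.Set.add s x = s ++ [x] := by simp [PySem.Set.add, h]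
      rw [List.foldl_cons, List.foldl_cons, h1, h2]
      exact ih (s ++ [x])

-- folding Set.add over an accumulator that already holds x (at any position) equals
-- folding over the x-free remainder, with x kept in place
theorem foldl_add_mid (x : String) (s₁ : List String) (xs : List String) :
    ∀ s₂ : List String,
      xs.foldl PySem.Set.add (s₁ ++ x :: s₂) =
        s₁ ++ x :: (((xs.filter (fun y => !(y == x))).foldl PySem.Set.add (s₁ ++ s₂)).drop
          s₁.length) := by
  induction xs with
  | nil =>
    intro s₂
    simp
  | cons y rest ih =>
    intro s₂
    by_cases hyx : y = x
    · subst hyx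
      have h1 : PySem.Set.add (s₁ ++ y :: s₂) y = s₁ ++ y :: s₂ := by
        simp [PySem.Set.add]
      simp only [List.foldl_cons, h1, List.filter_cons, beq_self_eq_true, Bool.not_true,
        Bool.false_eq_true, if_false]
      exact ih s₂
    · simp only [List.foldl_cons, List.filter_cons,
        show (y == x) = false from beq_eq_false_iff_ne.mpr hyx, Bool.not_false, if_true,
        List.foldl_cons]
      by_cases hy : y ∈ s₁ ++ s₂
      · have h1 : PySem.Set.add (s₁ ++ x :: s₂) y = s₁ ++ x :: s₂ := by
          have : y ∈ s₁ ++ x :: s₂ := by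
            rcases List.mem_append.mp hy with h | h
            · exact List.mem_append.mpr (Or.inl h)
            · exact List.mem_append.mpr (Or.inr (List.mem_cons_of_mem _ h))
          simp [PySem.Set.add, this]
        have h2 : PySem.Set.add (s₁ ++ s₂) y = s₁ ++ s₂ := by
          simp [PySem.Set.add, hy]
        rw [h1, h2]
        exact ih s₂
      · have h1 : PySem.Set.add (s₁ ++ x :: s₂) y = s₁ ++ x :: (s₂ ++ [y]) := by
          have hnm : y ∉ s₁ ++ x :: s₂ := by
            intro hmem
            rcases List.mem_append.mp hmem with h | h
            · exact hy (List.mem_append.mpr (Or.inl h))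
            · rcases List.mem_cons.mp h with h | h
              · exact hyx h
              · exact hy (List.mem_append.mpr (Or.inr h))
          simp [PySem.Set.add, hnm]
        have h2 : PySem.Set.add (s₁ ++ s₂) y = s₁ ++ (s₂ ++ [y]) := by
          simp [PySem.Set.add, hy]
        rw [h1, h2]
        exact ih (s₂ ++ [y])

-- the ordered-dedup fold equals the head-and-filter recursion (strong induction on length)
theorem foldl_add_eq_dedupRec_aux :
    ∀ (n : Nat) (xs : List String), xs.length ≤ n →
      xs.foldl PySem.Set.add ([] : List String) = pvDedupRec xs := by
  intro n
  induction n with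
  | zero =>
    intro xs hlen
    rw [List.length_eq_zero_iff.mp (Nat.le_zero.mp hlen)]
    rw [pvDedupRec]
    rfl
  | succ n ih =>
    intro xs hlen
    match xs with
    | [] => rw [pvDedupRec]; rfl
    | x :: rest =>
      have h0 : PySem.Set.add ([] : List String) x = [x] := by simp [PySem.Set.add]
      rw [List.foldl_cons, h0,
        show [x] = ([] : List String) ++ x :: [] from rfl,
        foldl_add_mid x [] rest []]
      simp only [List.nil_append, List.length_nil, List.drop_zero]
      rw [ih _ (le_trans (List.length_filter_le _ _) (Nat.le_of_succ_le_succ hlen))]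
      rw [pvDedupRec]

theorem foldl_add_eq_dedupRec (xs : List String) :
    xs.foldl PySem.Set.add ([] : List String) = pvDedupRec xs :=
  foldl_add_eq_dedupRec_aux xs.length xs (le_refl _)

-- ===== VERDICT (by name: the statement is the Claim_ definition above) =====
theorem extract_classifieds_pagination_targets_spec : Claim_equal_extract_classifieds_pagination_targets := by
  intro cs _
  show _ = _
  unfold extract_classifieds_pagination_targets extract_classifieds_pagination_targets_alt
  rw [pvA_eq_foldl_step]
  rw [show (([], PySem.Set.empty) : List String × PySem.Set String) =
      ((PySem.Set.empty : PySem.Set String), (PySem.Set.empty : PySem.Set String)) from rfl]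
  rw [pvStep_foldl_diag]
  exact foldl_add_eq_dedupRec _
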